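-- pv_equiv track=rewrite | github.com/gbrahmam/DSA-practise | Strange.py | strange
-- ===== SOURCE A (Python) =====
-- def strange(n):
--     if n<10:
--         return True
--     add = 0
--     prod = 1
--     while n!=0:
--         dig = n%10
--         n = n//10
--         add+=dig
--         prod*=dig
--     if add>=prod:
--         return True
--     else:
--         return False
-- ===== SOURCE B (Python) =====
-- def strange(n):
--     if n < 10:
--         return True
--     digits = [ord(c) - 48 for c in str(n)]
--     prod = 1
--     for d in digits:
--         prod *= d
--     return sum(digits) >= prod
-- ===== Notes on version B (the rewrite author's own statement) =====
-- stated objective: idiomatic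
-- what changed: Digits are read from the decimal string str(n) (most-significant first) and reduced with built-in sum and a product fold, instead of extracting them arithmetically with %10 and //10 in a two-accumulator while loop.
import Mathlib
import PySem

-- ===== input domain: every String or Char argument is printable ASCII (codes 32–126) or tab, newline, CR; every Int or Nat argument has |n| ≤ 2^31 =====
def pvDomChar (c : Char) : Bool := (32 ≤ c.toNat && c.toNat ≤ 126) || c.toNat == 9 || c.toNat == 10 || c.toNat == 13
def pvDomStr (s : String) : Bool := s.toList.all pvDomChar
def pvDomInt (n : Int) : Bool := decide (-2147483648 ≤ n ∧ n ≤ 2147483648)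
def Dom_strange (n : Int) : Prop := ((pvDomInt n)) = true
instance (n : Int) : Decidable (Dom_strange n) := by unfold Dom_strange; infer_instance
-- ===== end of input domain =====

-- B reads the digits from str(n) and reduces them with sum and a product fold (idiomatic),
-- instead of A's %10 // //10 two-accumulator while loop; same cost, no speed claim.

-- ===== PORT A =====
-- A's while loop; it is only ever entered with n ≥ 10, where Python's % and // on
-- nonnegative ints coincide with Nat's % and /, so the loop state is carried on Nat.
def strangeLoop (n : Nat) (add prod : Int) : Int × Int :=
  if _h : n = 0 then (add, prod)
  else strangeLoop (n / 10) (add + ((n % 10 : Nat) : Int)) (prod * ((n % 10 : Nat) : Int))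
termination_by n
decreasing_by exact Nat.div_lt_self (Nat.pos_of_ne_zero _h) (by norm_num)

def strange (n : Int) : Bool :=
  if n < 10 then true
  else
    let r := strangeLoop n.toNat 0 1
    decide (r.1 ≥ r.2)

-- ===== PORT B =====
def strange_alt (n : Int) : Bool :=
  if n < 10 then true
  else
    -- digits = [ord(c) - 48 for c in str(n)]
    let digits : List Int := (PySem.Int.toStr n).toList.map (fun c => (c.toNat : Int) - 48)
    -- prod = 1; for d in digits: prod *= d
    let prod := digits.foldl (· * ·) 1
    -- return sum(digits) >= prod
    decide (digits.foldl (· + ·) 0 ≥ prod)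

-- ===== PRECONDITION & SPEC =====
def Spec_strange (n : Int) (out : Bool) : Prop := out = strange_alt n
instance (n : Int) (out : Bool) : Decidable (Spec_strange n out) := by unfold Spec_strange; infer_instance

-- ===== CLAIM (what is proved, stated in full; the proofs are below) =====
def Claim_equal_strange : Prop := ∀ (n : Int), Dom_strange n → Spec_strange n (strange n)

-- ===== LEMMAS AND PROOFS =====

-- A's loop accumulates the sum and product of the base-10 digits.
theorem strangeLoop_eq (m : Nat) (add prod : Int) (hm : m ≠ 0) :
    strangeLoop m add prod =
      (add + ((Nat.digits 10 m).map (fun d => Int.ofNat d)).sum,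
       prod * ((Nat.digits 10 m).map (fun d => Int.ofNat d)).prod) := by
  induction m using Nat.strong_induction_on generalizing add prod with
  | _ m ih =>
    rw [strangeLoop]
    simp only [hm, dif_neg, not_false_iff]
    by_cases h10 : m / 10 = 0
    · have hlt : m < 10 := by omega
      rw [strangeLoop, dif_pos h10]
      rw [Nat.digits_def' (by norm_num : (1:Nat) < 10) (Nat.pos_of_ne_zero hm), h10]
      simp [Nat.mod_eq_of_lt hlt]
    · rw [ih (m / 10) (Nat.div_lt_self (Nat.pos_of_ne_zero hm) (by norm_num)) _ _ h10]
      rw [Nat.digits_def' (by norm_num : (1:Nat) < 10) (Nat.pos_of_ne_zero hm)]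
      simp [add_assoc, mul_assoc]

-- Core's toDigitsCore produces the digit characters, most significant first.
theorem toDigitsCore_eq (fuel : Nat) : ∀ (m : Nat) (ds : List Char), m ≠ 0 → m < fuel →
    Nat.toDigitsCore 10 fuel m ds = (Nat.digits 10 m).reverse.map Nat.digitChar ++ ds := by
  induction fuel with
  | zero => intro m ds _ h; omega
  | succ f ih =>
    intro m ds hm _
    rw [Nat.toDigitsCore]
    by_cases h10 : m / 10 = 0
    · have hlt : m < 10 := by omega
      simp only [h10, if_pos]
      rw [Nat.digits_def' (by norm_num : (1:Nat) < 10) (Nat.pos_of_ne_zero hm), h10]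
      simp [Nat.mod_eq_of_lt hlt]
    · have hmle : m ≤ f := by omega
      have hrec : m / 10 < f := lt_of_lt_of_le (Nat.div_lt_self (Nat.pos_of_ne_zero hm) (by norm_num)) hmle
      simp only [h10, if_neg, not_false_iff]
      rw [ih (m / 10) _ h10 hrec]
      rw [Nat.digits_def' (by norm_num : (1:Nat) < 10) (Nat.pos_of_ne_zero hm)]
      simp

theorem digitChar_val (d : Nat) (hd : d < 10) :
    ((Nat.digitChar d).toNat : Int) - 48 = (d : Int) := by
  interval_cases d <;> decide

-- ===== VERDICT (by name: the statement is the Claim_ definition above) =====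
theorem strange_spec : Claim_equal_strange := by
  intro n _
  unfold Spec_strange strange strange_alt
  by_cases hn : n < 10
  · simp [hn]
  · simp only [hn, if_neg, not_false_iff]
    have hm : 10 ≤ n.toNat := by omega
    have hm0 : n.toNat ≠ 0 := by omega
    -- B's digit list = reverse of Nat.digits, as Ints
    have hchars : (PySem.Int.toStr n).toList = Nat.toDigits 10 n.toNat := by
      rw [PySem.Int.toList_toStr, PySem.Int.toChars, if_neg (by omega : ¬ n < 0)]
    have hdig : (PySem.Int.toStr n).toList.map (fun c => (c.toNat : Int) - 48)
        = ((Nat.digits 10 n.toNat).map (fun d => Int.ofNat d)).reverse := by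
      rw [hchars, Nat.toDigits, toDigitsCore_eq _ _ _ hm0 (Nat.lt_succ_self _)]
      rw [List.append_nil, List.map_map, List.map_reverse]
      congr 1
      apply List.map_congr_left
      intro d hd
      exact digitChar_val d (Nat.digits_lt_base (by norm_num) hd)
    rw [hdig, strangeLoop_eq _ _ _ hm0, ← List.sum_eq_foldl, ← List.prod_eq_foldl,
      List.sum_reverse, List.prod_reverse, zero_add, one_mul]
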